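-- pv_equiv track=rewrite | github.com/omegaestable/magma-ai | _validate_candidate_magma.py | assign_vars
-- ===== SOURCE A (Python) =====
-- def assign_vars(e1, e2):
--     full = e1 + ' ' + e2
--     seen = []
--     for c in full:
--         if c.isalpha() and c not in seen:
--             seen.append(c)
--     mapping = {}
--     for i, v in enumerate(seen):
--         mapping[v] = i % 3
--     return mapping
-- ===== SOURCE B (Python) =====
-- def assign_vars(e1, e2):
--     # Rank-from-prefix formulation: a letter's value is the number of distinct
--     # alphabetic characters strictly before its first occurrence, mod 3; build
--     # the dict in one comprehension over positions (no dedup list, no counter).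
--     full = e1 + ' ' + e2
--     return {
--         c: len({d for d in full[:i] if d.isalpha()}) % 3
--         for i, c in enumerate(full)
--         if c.isalpha() and c not in full[:i]
--     }
-- ===== Notes on version B (the rewrite author's own statement) =====
-- stated objective: alternative
-- what changed: B replaces A's two staged passes (ordered-dedup 'seen' list, then an enumerate pass numbering it) by a single dict comprehension over positions that computes each letter's value independently as the number of distinct alphabetic characters in its strict prefix, mod 3 - no dedup list and no sequential counter; it trades state for per-position prefix recomputation.
import Mathlib
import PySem

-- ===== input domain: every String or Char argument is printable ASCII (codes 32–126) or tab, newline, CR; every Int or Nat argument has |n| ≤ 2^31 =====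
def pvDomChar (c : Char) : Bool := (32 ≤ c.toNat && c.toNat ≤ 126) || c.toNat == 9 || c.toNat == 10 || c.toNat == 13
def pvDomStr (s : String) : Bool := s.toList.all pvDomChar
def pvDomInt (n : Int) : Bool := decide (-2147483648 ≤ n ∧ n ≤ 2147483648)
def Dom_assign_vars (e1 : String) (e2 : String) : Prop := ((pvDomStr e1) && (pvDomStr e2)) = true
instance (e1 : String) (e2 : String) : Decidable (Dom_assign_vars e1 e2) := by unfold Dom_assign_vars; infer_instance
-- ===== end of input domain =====

-- B computes each letter's value independently as (distinct alphabetic characters in its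
-- strict prefix) mod 3, in one dict comprehension over positions — no dedup list, no counter
-- (alternative decomposition; not faster).

-- ===== PORT A =====
-- first loop: ordered dedup of the alphabetic characters
def assign_vars_seen (full : List Char) : List Char :=
  full.foldl (fun seen c =>
    if PySem.Chars.isalpha c && !(seen.contains c) then seen ++ [c] else seen) []

def assign_vars (e1 : String) (e2 : String) : List (String × Int) :=
  let full := (e1 ++ " " ++ e2).toList
  let seen := assign_vars_seen full
  let mapping := (PySem.List.enumerate seen).foldl
    (fun (d : PySem.Dict String Int) iv => d.insert (String.ofList [iv.2]) (PySem.Int.mod iv.1 3))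
    PySem.Dict.empty
  mapping.items

-- ===== PORT B =====
-- one entry of the dict comprehension: full[:i] is PySem.List.slice full none (some i);
-- len({d for d in … if d.isalpha()}) is (PySem.Set.ofList (….filter isalpha)).length
def assign_vars_entry (full : List Char) (d : PySem.Dict String Int) (iv : Int × Char) :
    PySem.Dict String Int :=
  if PySem.Chars.isalpha iv.2 && !((PySem.List.slice full none (some iv.1)).contains iv.2) then
    d.insert (String.ofList [iv.2])
      (PySem.Int.mod
        ((PySem.Set.ofList ((PySem.List.slice full none (some iv.1)).filter PySem.Chars.isalpha)).length : Int) 3)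
  else d

-- the comprehension builds the dict in iteration order over enumerate(full)
def assign_vars_alt (e1 : String) (e2 : String) : List (String × Int) :=
  let full := (e1 ++ " " ++ e2).toList
  ((PySem.List.enumerate full).foldl (assign_vars_entry full) PySem.Dict.empty).items

-- ===== PRECONDITION & SPEC =====
def Spec_assign_vars (e1 : String) (e2 : String) (out : List (String × Int)) : Prop := out = assign_vars_alt e1 e2
instance (e1 : String) (e2 : String) (out : List (String × Int)) : Decidable (Spec_assign_vars e1 e2 out) := by unfold Spec_assign_vars; infer_instance

-- ===== CLAIM (what is proved, stated in full; the proofs are below) =====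
def Claim_equal_assign_vars : Prop := ∀ (e1 : String) (e2 : String), Dom_assign_vars e1 e2 → Spec_assign_vars e1 e2 (assign_vars e1 e2)

-- ===== LEMMAS AND PROOFS =====

-- A's dedup loop is exactly set(filter isalpha) in first-occurrence order
lemma seen_eq_update (l : List Char) : ∀ s : List Char,
    l.foldl (fun seen c =>
      if PySem.Chars.isalpha c && !(seen.contains c) then seen ++ [c] else seen) s
    = PySem.Set.update s (l.filter PySem.Chars.isalpha) := by
  induction l with
  | nil => intro s; simp [PySem.Set.update]
  | cons c l ih =>
    intro s
    by_cases ha : PySem.Chars.isalpha c = true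
    · have hstep : (if PySem.Chars.isalpha c && !(s.contains c) then s ++ [c] else s)
          = PySem.Set.add s c := by
        by_cases h : s.contains c = true <;>
          simp [PySem.Set.add, PySem.Set.contains, ha]
      rw [List.foldl_cons, hstep, ih, List.filter_cons]
      simp only [ha, if_true, PySem.Set.update, List.foldl_cons]
    · rw [List.foldl_cons, if_neg (by simp [ha]), ih, List.filter_cons]
      simp [ha]

lemma seen_eq (full : List Char) :
    assign_vars_seen full = PySem.Set.ofList (full.filter PySem.Chars.isalpha) := by
  rw [assign_vars_seen, seen_eq_update, PySem.Set.ofList_eq_foldl, PySem.Set.update]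

lemma mem_seen (full : List Char) (c : Char) (ha : PySem.Chars.isalpha c = true) :
    (assign_vars_seen full).contains c = full.contains c := by
  rw [seen_eq]
  simp only [List.contains_eq_mem]
  apply decide_eq_decide.mpr
  rw [PySem.Set.mem_ofList, List.mem_filter]
  simp [ha]

-- the dict A's second loop builds from a given 'seen' list
def mkDict (seen : List Char) : PySem.Dict String Int :=
  (PySem.List.enumerate seen).foldl
    (fun (d : PySem.Dict String Int) iv => d.insert (String.ofList [iv.2]) (PySem.Int.mod iv.1 3))
    PySem.Dict.empty

lemma mkDict_append (seen : List Char) (c : Char) :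
    mkDict (seen ++ [c])
      = (mkDict seen).insert (String.ofList [c]) (PySem.Int.mod (seen.length : Int) 3) := by
  unfold mkDict
  rw [PySem.List.enumerate_append, List.foldl_append]
  simp [PySem.List.enumerate]

-- B's fold over the enumerated list computes A's two-pass dict
lemma bfold_eq (full : List Char) :
    (PySem.List.enumerate full).foldl (assign_vars_entry full) PySem.Dict.empty
      = mkDict (assign_vars_seen full) := by
  induction full using List.reverseRecOn with
  | nil => simp [PySem.List.enumerate, assign_vars_seen, mkDict]
  | append_singleton full c ih =>
    rw [PySem.List.enumerate_append, List.foldl_append]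
    have hcongr : ∀ (d : PySem.Dict String Int) (iv : Int × Char), iv ∈ PySem.List.enumerate full →
        assign_vars_entry (full ++ [c]) d iv = assign_vars_entry full d iv := by
      intro d iv hm
      rw [PySem.List.mem_enumerate_iff] at hm
      obtain ⟨k, hk, rfl⟩ := hm
      unfold assign_vars_entry
      have hsl : PySem.List.slice (full ++ [c]) none (some ((0 : Int) + (k : Nat)))
          = PySem.List.slice full none (some ((0 : Int) + (k : Nat))) := by
        simp only [zero_add, PySem.List.slice_to_natCast]
        exact List.take_append_of_le_length (le_of_lt hk)
      rw [hsl]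
    rw [PySem.List.foldl_congr_mem (PySem.List.enumerate full) (assign_vars_entry (full ++ [c])) (assign_vars_entry full) PySem.Dict.empty hcongr, ih]
    -- the final position: its prefix is exactly full
    have hsl : PySem.List.slice (full ++ [c]) none (some ((0 : Int) + full.length)) = full := by
      simp only [zero_add]
      rw [show ((full.length : Int)) = ((full.length : Nat) : Int) from rfl,
        PySem.List.slice_to_natCast]
      simp
    have hseen : assign_vars_seen (full ++ [c])
        = if PySem.Chars.isalpha c && !((assign_vars_seen full).contains c)
          then assign_vars_seen full ++ [c] else assign_vars_seen full := by
      unfold assign_vars_seen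
      rw [List.foldl_append]; rfl
    simp only [PySem.List.enumerate, List.foldl_cons, List.foldl_nil, assign_vars_entry, hsl, hseen]
    by_cases ha : PySem.Chars.isalpha c = true
    · rw [← mem_seen full c ha]
      by_cases hc : c ∈ assign_vars_seen full
      · simp [ha, hc]
      · simp only [ha, Bool.true_and, List.contains_eq_mem, hc, decide_false, Bool.not_false,
          if_true]
        rw [mkDict_append]
        congr 2
        rw [seen_eq]
    · simp [ha]

-- ===== VERDICT (by name: the statement is the Claim_ definition above) =====
theorem assign_vars_spec : Claim_equal_assign_vars := by
  intro e1 e2 _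
  exact (congrArg PySem.Dict.items (bfold_eq (e1 ++ " " ++ e2).toList)).symm
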